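-- pv_equiv track=rewrite | github.com/sean-park6353/programmers | level1/42840.py | solution
-- ===== SOURCE A (Python) =====
-- def solution(answers):
--     a = [1, 2, 3, 4, 5]*len(answers)
--     b = [2, 1, 2, 3, 2, 4, 2, 5]*len(answers)
--     c = [3, 3, 1, 1, 2, 2, 4, 4, 5, 5]*len(answers)
--     x = 0
--     y = 0
--     z = 0
--     for i in range(len(answers)):
--         if i == len(answers):
--             break
--         if answers[i] == a[i]:
--             x += 1
--     for i in range(len(answers)):
--         if i == len(answers):
--             break
--         if answers[i] == b[i]:
--             y += 1
--     for i in range(len(answers)):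
--         if i == len(answers):
--             break
--         if answers[i] == c[i]:
--             z += 1
--     arr = [x, y, z]
--     if x == y == z:
--         return [1, 2, 3]
--     elif x == y == max(arr):
--         return [1, 2]
--     elif y == z == max(arr):
--         return [2, 3]
--     elif x == z == max(arr):
--         return [1, 3]
--     else:
--         return [arr.index(max(arr))+1]
-- ===== SOURCE B (Python) =====
-- def solution(answers):
--     p1 = [1, 2, 3, 4, 5]
--     p2 = [2, 1, 2, 3, 2, 4, 2, 5]
--     p3 = [3, 3, 1, 1, 2, 2, 4, 4, 5, 5]
--     x = y = z = 0
--     for i, v in enumerate(answers):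
--         x += v == p1[i % 5]
--         y += v == p2[i % 8]
--         z += v == p3[i % 10]
--     arr = [x, y, z]
--     m = max(arr)
--     return [i + 1 for i, s in enumerate(arr) if s == m]
-- ===== Notes on version B (the rewrite author's own statement) =====
-- stated objective: simpler
-- what changed: One pass over enumerate(answers) with modulo indexing into the three fixed base patterns replaces the three len(answers)-fold replicated pattern lists and three separate index loops (with their dead break guards), and an argmax comprehension over [x,y,z] replaces the five-way if/elif tie cascade.
import Mathlib
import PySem

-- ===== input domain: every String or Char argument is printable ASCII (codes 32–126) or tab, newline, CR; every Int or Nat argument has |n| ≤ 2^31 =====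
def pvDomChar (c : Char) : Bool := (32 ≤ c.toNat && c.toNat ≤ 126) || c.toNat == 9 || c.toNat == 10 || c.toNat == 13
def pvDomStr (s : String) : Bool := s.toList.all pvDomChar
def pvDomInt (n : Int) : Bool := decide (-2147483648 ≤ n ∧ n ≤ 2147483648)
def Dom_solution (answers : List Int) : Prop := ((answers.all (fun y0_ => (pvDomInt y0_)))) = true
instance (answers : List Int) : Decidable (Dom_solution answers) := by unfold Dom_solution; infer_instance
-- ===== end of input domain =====

-- B is a simpler decomposition of A: one pass with modulo indexing into the fixed base
-- patterns instead of replicated lists and three index loops, and an argmax comprehension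
-- instead of the if/elif tie cascade.  Return values proved equal on all inputs.

-- ===== PORT A =====
-- the 'for i in range(len(answers)): if i == len(answers): break; if answers[i]==ap[i]: x+=1'
-- loop, with its (dead) break guard kept, as structural recursion over the range list
def pvLoopA (answers ap : List Int) (n : Int) : List Int → Int → Int
  | [], x => x
  | i :: rest, x =>
    if i = n then x
    else pvLoopA answers ap n rest
      (if PySem.List.pyGet? answers i = PySem.List.pyGet? ap i then x + 1 else x)

def solution (answers : List Int) : List Int :=
  let n : Int := answers.length
  let a := PySem.List.pyRepeat [1, 2, 3, 4, 5] n
  let b := PySem.List.pyRepeat [2, 1, 2, 3, 2, 4, 2, 5] n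
  let c := PySem.List.pyRepeat [3, 3, 1, 1, 2, 2, 4, 4, 5, 5] n
  let x := pvLoopA answers a n (PySem.List.pyRange 0 n 1) 0
  let y := pvLoopA answers b n (PySem.List.pyRange 0 n 1) 0
  let z := pvLoopA answers c n (PySem.List.pyRange 0 n 1) 0
  let arr := [x, y, z]
  let m := (PySem.List.max? arr (fun v => v)).getD 0
  if x = y ∧ y = z then [1, 2, 3]
  else if x = y ∧ y = m then [1, 2]
  else if y = z ∧ z = m then [2, 3]
  else if x = z ∧ z = m then [1, 3]
  else [(((PySem.List.index? arr m).getD 0 : Nat) : Int) + 1]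

-- ===== PORT B =====
def solution_alt (answers : List Int) : List Int :=
  let p1 : List Int := [1, 2, 3, 4, 5]
  let p2 : List Int := [2, 1, 2, 3, 2, 4, 2, 5]
  let p3 : List Int := [3, 3, 1, 1, 2, 2, 4, 4, 5, 5]
  let s := (PySem.List.enumerate answers 0).foldl
    (fun s iv =>
      (s.1 + (if iv.2 = PySem.List.pyGetD p1 (PySem.Int.mod iv.1 5) 0 then 1 else 0),
       s.2.1 + (if iv.2 = PySem.List.pyGetD p2 (PySem.Int.mod iv.1 8) 0 then 1 else 0),
       s.2.2 + (if iv.2 = PySem.List.pyGetD p3 (PySem.Int.mod iv.1 10) 0 then 1 else 0)))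
    ((0 : Int), (0 : Int), (0 : Int))
  let arr := [s.1, s.2.1, s.2.2]
  let m := (PySem.List.max? arr (fun v => v)).getD 0
  ((PySem.List.enumerate arr 0).filter (fun p => p.2 == m)).map (fun p => p.1 + 1)

-- ===== PRECONDITION & SPEC =====
def Spec_solution (answers : List Int) (out : List Int) : Prop := out = solution_alt answers
instance (answers : List Int) (out : List Int) : Decidable (Spec_solution answers out) := by unfold Spec_solution; infer_instance

-- ===== CLAIM (what is proved, stated in full; the proofs are below) =====
def Claim_equal_solution : Prop := ∀ (answers : List Int), Dom_solution answers → Spec_solution answers (solution answers)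

-- ===== LEMMAS AND PROOFS =====

-- indexing a replicated list is modulo indexing into the base pattern
lemma rep_get (p : List Int) :
    ∀ (n k : Nat), k < p.length * n →
      ((List.replicate n p).flatten)[k]? = p[k % p.length]? := by
  intro n
  induction n with
  | zero => intro k hk; simp at hk
  | succ n ih =>
    intro k hk
    rw [List.replicate_succ, List.flatten_cons]
    by_cases h : k < p.length
    · rw [List.getElem?_append_left h, Nat.mod_eq_of_lt h]
    · rw [Nat.not_lt] at h
      have hms : p.length * (n+1) = p.length * n + p.length := by ring
      rw [List.getElem?_append_right h, ih (k - p.length) (by omega),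
        Nat.mod_eq_sub_mod h]

lemma pyGet?_rep (p answers : List Int) (hp : p ≠ []) (i : Int)
    (h0 : 0 ≤ i) (hn : i < (answers.length : Int)) :
    PySem.List.pyGet? (PySem.List.pyRepeat p (answers.length : Int)) i
      = p[i.toNat % p.length]? := by
  have hplen : 0 < p.length := List.length_pos_iff.mpr hp
  have hlen : (PySem.List.pyRepeat p (answers.length : Int)).length
      = answers.length * p.length := by
    simp [PySem.List.pyRepeat, List.length_flatten, Nat.mul_comm]
  have hkk : i.toNat < p.length * answers.length := by
    have : i.toNat < answers.length := by omega
    calc i.toNat < answers.length := this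
      _ ≤ p.length * answers.length := Nat.le_mul_of_pos_left _ hplen
  have hi : i < ((PySem.List.pyRepeat p (answers.length : Int)).length : Int) := by
    rw [hlen]; push_cast; nlinarith [hplen, hn, h0]
  simp only [PySem.List.pyGet?, PySem.List.pyIdx?, if_pos h0, if_pos hi, Option.bind_some]
  exact rep_get p answers.length i.toNat hkk

-- A's break guard never fires on range(len(answers)); the loop is a plain counting fold
lemma pvLoopA_eq (answers ap : List Int) (n : Int) :
    ∀ (l : List Int) (x : Int), (∀ i ∈ l, i ≠ n) →
      pvLoopA answers ap n l x
        = l.foldl (fun x i =>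
            if PySem.List.pyGet? answers i = PySem.List.pyGet? ap i then x + 1 else x) x := by
  intro l
  induction l with
  | nil => intro x _; simp [pvLoopA]
  | cons i rest ih =>
    intro x h
    rw [pvLoopA, if_neg (h i (by simp))]
    simp only [List.foldl_cons]
    exact ih _ (fun j hj => h j (by simp [hj]))

-- the per-pattern count: A's loop over range(len) equals B's fold over enumerate
lemma cnt_eq (p answers : List Int) (hp : p ≠ []) (m : Int) (hm : m = (p.length : Int)) :
    pvLoopA answers (PySem.List.pyRepeat p (answers.length : Int)) (answers.length : Int)
        (PySem.List.pyRange 0 (answers.length : Int) 1) 0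
      = (PySem.List.enumerate answers 0).foldl
          (fun acc iv => acc + (if iv.2 = PySem.List.pyGetD p (PySem.Int.mod iv.1 m) 0 then 1 else 0)) 0 := by
  have hplen : 0 < p.length := List.length_pos_iff.mpr hp
  rw [pvLoopA_eq answers _ _ _ 0
      (by intro i hi; rw [PySem.List.mem_pyRange_one] at hi; omega)]
  rw [PySem.List.enumerate_eq_map_pyRange (d := 0), List.foldl_map]
  apply PySem.List.foldl_congr_mem
  intro acc i hi
  rw [PySem.List.mem_pyRange_one] at hi
  obtain ⟨h0, hn⟩ := hi
  have hia : PySem.List.pyGet? answers i = answers[i.toNat]? := by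
    simp [PySem.List.pyGet?, PySem.List.pyIdx?, h0, hn]
  have hka : i.toNat < answers.length := by omega
  have hmod : PySem.Int.mod i m = ((i.toNat % p.length : Nat) : Int) := by
    subst hm
    have h1 : PySem.Int.mod i (p.length : Int) = i % (p.length : Int) := by
      simp [PySem.Int.mod, Int.fmod_eq_emod]
    rw [h1, Int.natCast_mod, Int.toNat_of_nonneg h0]
  have hkp : i.toNat % p.length < p.length := Nat.mod_lt _ hplen
  have hgp : PySem.List.pyGetD p (PySem.Int.mod i m) 0 = p[i.toNat % p.length] := by
    rw [hmod, PySem.List.pyGetD_natCast]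
    exact List.getD_eq_getElem p 0 hkp
  have hga : PySem.List.pyGetD answers i 0 = answers[i.toNat] := by
    conv_lhs => rw [show i = ((i.toNat : Nat) : Int) by omega]
    rw [PySem.List.pyGetD_natCast]
    exact List.getD_eq_getElem answers 0 hka
  rw [pyGet?_rep p answers hp i h0 hn, hia, hgp, hga,
    List.getElem?_eq_getElem hka, List.getElem?_eq_getElem hkp]
  simp only [Option.some.injEq]
  split <;> rename_i hc <;> simp

-- the finishing step: A's if/elif cascade equals B's argmax comprehension
lemma maxq (x y z : Int) :
    (PySem.List.max? [x, y, z] (fun v => v)).getD 0 = max x (max y z) := by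
  simp [PySem.List.max?]
  split_ifs <;> simp_all <;>
    first
      | omega
      | (split_ifs <;> simp_all <;> omega)

lemma finale_core (x y z M : Int) (hG : max x (max y z) = M) :
    (if x = y ∧ y = z then ([1, 2, 3] : List Int)
     else if x = y ∧ y = M then [1, 2]
     else if y = z ∧ z = M then [2, 3]
     else if x = z ∧ z = M then [1, 3]
     else [(((PySem.List.index? [x, y, z] M).getD 0 : Nat) : Int) + 1])
    = ((PySem.List.enumerate [x, y, z] 0).filter
        (fun p => p.2 == M)).map (fun p => p.1 + 1) := by
  have hbx : x ≤ M := by omega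
  have hby : y ≤ M := by omega
  have hbz : z ≤ M := by omega
  have hmem : x = M ∨ y = M ∨ z = M := by omega
  clear hG
  by_cases hx : x = M <;> by_cases hy : y = M <;> by_cases hz : z = M <;>
    simp_all [PySem.List.enumerate_cons, PySem.List.enumerate_nil, List.filter,
      PySem.List.index?_eq_idxOf?, List.idxOf?, List.findIdx?_cons,
      beq_eq_decide] <;>
    first
      | rfl
      | omega

-- ===== VERDICT (by name: the statement is the Claim_ definition above) =====
theorem solution_spec : Claim_equal_solution := by
  intro answers _
  unfold Spec_solution
  simp only [solution, solution_alt]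
  have hs1 : (PySem.List.enumerate answers 0).foldl
      (fun s iv =>
        (s.1 + (if iv.2 = PySem.List.pyGetD [1, 2, 3, 4, 5] (PySem.Int.mod iv.1 5) 0 then 1 else 0),
         s.2.1 + (if iv.2 = PySem.List.pyGetD [2, 1, 2, 3, 2, 4, 2, 5] (PySem.Int.mod iv.1 8) 0 then 1 else 0),
         s.2.2 + (if iv.2 = PySem.List.pyGetD [3, 3, 1, 1, 2, 2, 4, 4, 5, 5] (PySem.Int.mod iv.1 10) 0 then 1 else 0)))
      ((0 : Int), (0 : Int), (0 : Int))
      = ((PySem.List.enumerate answers 0).foldl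
           (fun acc iv => acc + (if iv.2 = PySem.List.pyGetD [1, 2, 3, 4, 5] (PySem.Int.mod iv.1 5) 0 then 1 else 0)) 0,
         (PySem.List.enumerate answers 0).foldl
           (fun acc iv => acc + (if iv.2 = PySem.List.pyGetD [2, 1, 2, 3, 2, 4, 2, 5] (PySem.Int.mod iv.1 8) 0 then 1 else 0)) 0,
         (PySem.List.enumerate answers 0).foldl
           (fun acc iv => acc + (if iv.2 = PySem.List.pyGetD [3, 3, 1, 1, 2, 2, 4, 4, 5, 5] (PySem.Int.mod iv.1 10) 0 then 1 else 0)) 0) := by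
    rw [PySem.List.foldl_prod_mk
        (f := fun (acc : Int) (iv : Int × Int) =>
          acc + (if iv.2 = PySem.List.pyGetD [1, 2, 3, 4, 5] (PySem.Int.mod iv.1 5) 0 then 1 else 0))
        (g := fun (s2 : Int × Int) (iv : Int × Int) =>
          (s2.1 + (if iv.2 = PySem.List.pyGetD [2, 1, 2, 3, 2, 4, 2, 5] (PySem.Int.mod iv.1 8) 0 then 1 else 0),
           s2.2 + (if iv.2 = PySem.List.pyGetD [3, 3, 1, 1, 2, 2, 4, 4, 5, 5] (PySem.Int.mod iv.1 10) 0 then 1 else 0))),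
      PySem.List.foldl_prod_mk
        (f := fun (acc : Int) (iv : Int × Int) =>
          acc + (if iv.2 = PySem.List.pyGetD [2, 1, 2, 3, 2, 4, 2, 5] (PySem.Int.mod iv.1 8) 0 then 1 else 0))
        (g := fun (acc : Int) (iv : Int × Int) =>
          acc + (if iv.2 = PySem.List.pyGetD [3, 3, 1, 1, 2, 2, 4, 4, 5, 5] (PySem.Int.mod iv.1 10) 0 then 1 else 0))]
  rw [hs1,
    ← cnt_eq [1, 2, 3, 4, 5] answers (by simp) 5 (by norm_num),
    ← cnt_eq [2, 1, 2, 3, 2, 4, 2, 5] answers (by simp) 8 (by norm_num),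
    ← cnt_eq [3, 3, 1, 1, 2, 2, 4, 4, 5, 5] answers (by simp) 10 (by norm_num)]
  exact finale_core _ _ _ _ (maxq _ _ _).symm
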